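-- pv_equiv track=rewrite | github.com/cahlen/idontknow | scripts/experiments/zaremba-effective-bound/pointwise_check.py | enumerate_denominators
-- ===== SOURCE A (Python) =====
-- def enumerate_denominators(max_denom, A=5):
--     """
--     Enumerate all denominators reachable by CFs with partial quotients in {1,...,A}.
--     Returns list of (denominator, count) pairs.
--
--     Uses the convergent recurrence: q_k = a_k * q_{k-1} + q_{k-2}
--     """
--     denom_counts = {}
--
--     def recurse(q_prev, q, depth):
--         if q > max_denom:
--             return
--         if q > 0:
--             denom_counts[q] = denom_counts.get(q, 0) + 1
--         for a in range(1, A + 1):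
--             q_new = a * q + q_prev
--             if q_new > max_denom:
--                 break
--             recurse(q, q_new, depth + 1)
--
--     # Start: q_{-1} = 0, q_0 = 1 (before any CF digit)
--     # First digit a_1 gives q_1 = a_1
--     for a1 in range(1, A + 1):
--         recurse(0, 1, 0)  # Actually start from the identity
--         break
--
--     # Correct enumeration: CF [a1, a2, ...] gives denominator sequence
--     # q_{-1} = 0, q_0 = 1
--     # q_1 = a_1, q_2 = a_2*a_1 + 1, etc.
--     denom_counts = {}
--
--     def enum(q_prev, q):
--         if q > max_denom:
--             return
--         if q >= 1:
--             denom_counts[q] = denom_counts.get(q, 0) + 1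
--         for a in range(1, A + 1):
--             q_new = a * q + q_prev
--             if q_new > max_denom:
--                 break
--             enum(q, q_new)
--
--     # Seed: after "leading 0" of CF [0; a1, a2, ...], we have q=1, q_prev=0
--     # First digit a1 gives q_new = a1*1 + 0 = a1
--     denom_counts[1] = 1  # d=1 is always reachable
--     for a1 in range(1, A + 1):
--         enum(1, a1)
--
--     return denom_counts
-- ===== SOURCE B (Python) =====
-- def enumerate_denominators(max_denom, A=5):
--     """
--     Enumerate all denominators reachable by CFs with partial quotients in {1,...,A}.
--     Returns dict of denominator -> count.
--
--     Iterative worklist instead of recursion: an explicit stack of (q_prev, q)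
--     states is processed in DFS order (seeds pushed in descending order so the
--     smallest first digit is popped first), tallying each popped denominator.
--     """
--     counts = {1: 1}
--     # stack of states, top = end of list; seeds descending so a1 = 1 pops first
--     stack = [(1, a1) for a1 in range(min(A, max_denom), 0, -1)]
--     while stack:
--         q_prev, q = stack.pop()
--         counts[q] = counts.get(q, 0) + 1
--         kids = []
--         for a in range(1, A + 1):
--             q_new = a * q + q_prev
--             if q_new > max_denom:
--                 break
--             kids.append((q, q_new))
--         stack.extend(reversed(kids))
--     return counts
-- ===== Notes on version B (the rewrite author's own statement) =====
-- stated objective: alternative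
-- what changed: B replaces A's recursive closure-mutating DFS (and drops A's dead first enumeration block) with an iterative worklist: an explicit stack of (q_prev, q) states popped in DFS order, tallying each popped denominator into the dict; children are collected into a list and pushed reversed so the visit order is identical.
import Mathlib
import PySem

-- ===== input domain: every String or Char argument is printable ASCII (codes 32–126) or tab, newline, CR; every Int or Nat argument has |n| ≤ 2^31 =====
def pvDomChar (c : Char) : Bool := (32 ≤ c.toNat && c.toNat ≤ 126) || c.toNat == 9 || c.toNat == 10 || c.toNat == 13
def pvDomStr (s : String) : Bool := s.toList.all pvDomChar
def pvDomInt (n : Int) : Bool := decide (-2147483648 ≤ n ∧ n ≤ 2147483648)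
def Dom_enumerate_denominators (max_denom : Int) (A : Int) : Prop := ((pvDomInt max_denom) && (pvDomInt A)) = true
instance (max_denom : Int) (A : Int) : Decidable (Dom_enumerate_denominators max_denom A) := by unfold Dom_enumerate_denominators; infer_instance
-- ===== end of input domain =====

-- B replaces A's recursive closure-mutating DFS (and drops A's dead first enumeration block) with
-- an iterative worklist: an explicit stack of (q_prev, q) states popped in DFS order (objective: alternative).

-- ===== PORT A =====
-- fuel is only a Lean totality guard for A's recursion; 'for a in range(1, A+1): … break' is ported as a
-- foldl over the range whose Bool component records that the break fired (the standard break encoding);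
-- loopStep is that loop's body, with 'rec' the recursive call of the enclosing function.

def loopStep (md : Int) (rec : Int → Int → PySem.Dict Int Int → PySem.Dict Int Int)
    (q_prev q : Int) (s : PySem.Dict Int Int × Bool) (a : Int) : PySem.Dict Int Int × Bool :=
  if s.2 then s
  else if md < a * q + q_prev then (s.1, true)
  else (rec q (a * q + q_prev) s.1, false)

-- recurse(q_prev, q, depth) of A's first (dead) block
def recurseGo (md A : Int) : Nat → Int → Int → Int → PySem.Dict Int Int → PySem.Dict Int Int
  | 0, _, _, _, d => d
  | f + 1, q_prev, q, depth, d =>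
    if md < q then d
    else
      let d1 := if 0 < q then PySem.Dict.insert d q (PySem.Dict.getD d q 0 + 1) else d
      ((PySem.List.pyRange 1 (A + 1) 1).foldl
        (loopStep md (fun qp' q' d' => recurseGo md A f qp' q' (depth + 1) d') q_prev q)
        (d1, false)).1

-- enum(q_prev, q) of A's second block
def enumGo (md A : Int) : Nat → Int → Int → PySem.Dict Int Int → PySem.Dict Int Int
  | 0, _, _, d => d
  | f + 1, q_prev, q, d =>
    if md < q then d
    else
      let d1 := if 1 ≤ q then PySem.Dict.insert d q (PySem.Dict.getD d q 0 + 1) else d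
      ((PySem.List.pyRange 1 (A + 1) 1).foldl
        (loopStep md (enumGo md A f) q_prev q)
        (d1, false)).1

def enumerate_denominators (max_denom : Int) (A : Int) : List (Int × Int) :=
  let fuel := (max max_denom 0).toNat + 2
  -- dead first block: 'for a1 in range(1, A+1): recurse(0, 1, 0); break' — body runs once iff A ≥ 1;
  -- its dict is discarded (denom_counts is reassigned to {} right after)
  let _dead : PySem.Dict Int Int :=
    if 1 ≤ A then recurseGo max_denom A fuel 0 1 0 PySem.Dict.empty else PySem.Dict.empty
  -- denom_counts = {}; denom_counts[1] = 1
  let d0 : PySem.Dict Int Int := PySem.Dict.insert PySem.Dict.empty 1 1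
  -- for a1 in range(1, A+1): enum(1, a1)
  let dct := (PySem.List.pyRange 1 (A + 1) 1).foldl (fun d a1 => enumGo max_denom A fuel 1 a1 d) d0
  dct.items

-- ===== PORT B =====
-- 'kids = []; for a in range(1, A+1): q_new = a*q+q_prev; if q_new > max_denom: break; kids.append((q, q_new))'
-- (same break encoding as in port A; edStep is the loop body; no recursion)
def edStep (md q_prev q : Int) (s : List (Int × Int) × Bool) (a : Int) : List (Int × Int) × Bool :=
  if s.2 then s
  else if md < a * q + q_prev then (s.1, true)
  else (s.1 ++ [(q, a * q + q_prev)], false)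

def edKids (md A q_prev q : Int) : List (Int × Int) :=
  ((PySem.List.pyRange 1 (A + 1) 1).foldl (edStep md q_prev q) ([], false)).1

-- termination measure for the worklist loop: a pushed state (q_prev, q) costs (A.toNat+1)^(md-q+1)
def edPhi (md A q : Int) : Nat := (A.toNat + 1) ^ ((md - q).toNat + 1)
def edMeasure (md A : Int) (st : List (Int × Int)) : Nat := (st.map (fun p => edPhi md A p.2)).sum

-- the two lemmas below are cited by edRun's termination proof (hence they live above the port)
theorem edKids_spec (md A qp q : Int) (h1 : 1 ≤ qp) (h2 : qp ≤ q) :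
    edKids md A qp q
      = (PySem.List.pyRange 1 (min A (PySem.Int.floordiv (md - qp) q) + 1) 1).map
          (fun b => (q, b * q + qp)) := by
  have loopT : ∀ (l : List Int) (acc : List (Int × Int)),
      l.foldl (edStep md qp q) (acc, true) = (acc, true) := by
    intro l
    induction l with
    | nil => intro acc; rfl
    | cons x t ih => intro acc; simpa [edStep] using ih acc
  have loop : ∀ (n : Nat) (a : Int), (A + 1 - a).toNat ≤ n → 1 ≤ a → ∀ acc : List (Int × Int),
      ((PySem.List.pyRange a (A + 1) 1).foldl (edStep md qp q) (acc, false)).1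
        = acc ++ (PySem.List.pyRange a (min A (PySem.Int.floordiv (md - qp) q) + 1) 1).map
            (fun b => (q, b * q + qp)) := by
    intro n
    induction n with
    | zero =>
      intro a hle _ acc
      rw [PySem.List.pyRange_one_eq_nil (by omega), PySem.List.pyRange_one_eq_nil (by omega)]
      simp
    | succ n ih =>
      intro a hle ha acc
      by_cases haA : a ≤ A
      · rw [PySem.List.pyRange_one_cons (by omega : a < A + 1), List.foldl_cons]
        by_cases hnew : md < a * q + qp
        · have hdv : PySem.Int.floordiv (md - qp) q < a :=
            (PySem.Int.floordiv_lt_iff_lt_mul (by omega)).mpr (by linarith)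
          rw [show edStep md qp q (acc, false) a = (acc, true) by simp [edStep, hnew],
              loopT, PySem.List.pyRange_one_eq_nil (by omega)]
          simp
        · have h1q : (1 : Int) ≤ a * q := by
            have := mul_le_mul ha (le_trans h1 h2) zero_le_one (le_trans zero_le_one ha)
            linarith
          have hdv : a ≤ PySem.Int.floordiv (md - qp) q :=
            (PySem.Int.le_floordiv_iff_mul_le (by omega)).mpr (by linarith)
          rw [show edStep md qp q (acc, false) a = (acc ++ [(q, a * q + qp)], false) by
                simp [edStep, hnew],
              ih (a + 1) (by omega) (by omega)]
          rw [PySem.List.pyRange_one_cons (by omega : a < min A (PySem.Int.floordiv (md - qp) q) + 1)]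
          simp
      · rw [PySem.List.pyRange_one_eq_nil (by omega), PySem.List.pyRange_one_eq_nil (by omega)]
        simp
  have := loop A.toNat 1 (by omega) (by omega) []
  simpa [edKids] using this

theorem edKids_measure_lt (md A q_prev q : Int) (h1 : 1 ≤ q_prev) (h2 : q_prev ≤ q) (h3 : q ≤ md)
    (rest : List (Int × Int)) :
    edMeasure md A (edKids md A q_prev q ++ rest) < edMeasure md A ((q_prev, q) :: rest) := by
  have happ : edMeasure md A (edKids md A q_prev q ++ rest)
      = edMeasure md A (edKids md A q_prev q) + edMeasure md A rest := by
    simp [edMeasure]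
  have hcons : edMeasure md A ((q_prev, q) :: rest) = edPhi md A q + edMeasure md A rest := by
    simp [edMeasure]
  have hbound : edMeasure md A (edKids md A q_prev q) < edPhi md A q := by
    rw [edKids_spec md A q_prev q h1 h2]
    have hrw : edMeasure md A
          ((PySem.List.pyRange 1 (min A (PySem.Int.floordiv (md - q_prev) q) + 1) 1).map
            (fun b => (q, b * q + q_prev)))
        = ((PySem.List.pyRange 1 (min A (PySem.Int.floordiv (md - q_prev) q) + 1) 1).map
            (fun b => edPhi md A (b * q + q_prev))).sum := by
      simp [edMeasure, List.map_map, Function.comp_def]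
    rw [hrw]
    have hle : ∀ x ∈ (PySem.List.pyRange 1 (min A (PySem.Int.floordiv (md - q_prev) q) + 1) 1).map
        (fun b => edPhi md A (b * q + q_prev)), x ≤ (A.toNat + 1) ^ ((md - q).toNat) := by
      intro x hx
      obtain ⟨b, hb, rfl⟩ := List.mem_map.mp hx
      obtain ⟨hb1, hb2⟩ := PySem.List.mem_pyRange_one.mp hb
      have hble : b ≤ PySem.Int.floordiv (md - q_prev) q := by omega
      have hbq : b * q + q_prev ≤ md := by
        have := (PySem.Int.le_floordiv_iff_mul_le (by omega)).mp hble
        linarith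
      have hq2 : q ≤ b * q := le_mul_of_one_le_left (by omega) hb1
      have hvge : q + 1 ≤ b * q + q_prev := by omega
      have hrfl : edPhi md A (b * q + q_prev)
          = (A.toNat + 1) ^ ((md - (b * q + q_prev)).toNat + 1) := rfl
      rw [hrfl]
      exact Nat.pow_le_pow_right (by omega) (by omega)
    have hsum := List.sum_le_card_nsmul _ _ hle
    have hlen : ((PySem.List.pyRange 1 (min A (PySem.Int.floordiv (md - q_prev) q) + 1) 1).map
        (fun b => edPhi md A (b * q + q_prev))).length ≤ A.toNat := by
      rw [List.length_map, PySem.List.length_pyRange_one]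
      omega
    have hstep : (A.toNat + 1) ^ ((md - q).toNat) * A.toNat < edPhi md A q := by
      have hx : 1 ≤ (A.toNat + 1) ^ ((md - q).toNat) := Nat.one_le_pow _ _ (by omega)
      have hphi : edPhi md A q
          = (A.toNat + 1) ^ ((md - q).toNat) * A.toNat + (A.toNat + 1) ^ ((md - q).toNat) := by
        simp only [edPhi, pow_succ]
        ring
      rw [hphi]
      exact Nat.lt_add_of_pos_right (by omega)
    calc ((PySem.List.pyRange 1 (min A (PySem.Int.floordiv (md - q_prev) q) + 1) 1).map
            (fun b => edPhi md A (b * q + q_prev))).sum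
        ≤ _ • (A.toNat + 1) ^ ((md - q).toNat) := hsum
      _ ≤ A.toNat * (A.toNat + 1) ^ ((md - q).toNat) := by
          simp only [smul_eq_mul]
          exact Nat.mul_le_mul_right _ hlen
      _ = (A.toNat + 1) ^ ((md - q).toNat) * A.toNat := Nat.mul_comm _ _
      _ < edPhi md A q := hstep
  rw [happ, hcons]
  omega

-- 'while stack: q_prev, q = stack.pop(); counts[q] = counts.get(q, 0) + 1; …; stack.extend(reversed(kids))'
-- the Lean stack stores the python list reversed (top = head), so 'extend(reversed(kids))' = 'kids ++ rest';
-- the dite guard only makes the recursion total: every state actually pushed satisfies 1 ≤ q_prev ≤ q ≤ max_denom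
def edRun (md A : Int) : List (Int × Int) → PySem.Dict Int Int → PySem.Dict Int Int
  | [], d => d
  | (q_prev, q) :: rest, d =>
    if h : 1 ≤ q_prev ∧ q_prev ≤ q ∧ q ≤ md then
      edRun md A (edKids md A q_prev q ++ rest)
        (PySem.Dict.insert d q (PySem.Dict.getD d q 0 + 1))
    else d
termination_by st _ => edMeasure md A st
decreasing_by exact edKids_measure_lt md A q_prev q h.1 h.2.1 h.2.2 rest

def enumerate_denominators_alt (max_denom : Int) (A : Int) : List (Int × Int) :=
  -- counts = {1: 1}
  let counts : PySem.Dict Int Int := PySem.Dict.insert PySem.Dict.empty 1 1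
  -- stack = [(1, a1) for a1 in range(min(A, max_denom), 0, -1)]  (top = end; here reversed: top = head)
  let stack := (PySem.List.pyRange 1 (min A max_denom + 1) 1).map (fun a1 => ((1 : Int), a1))
  (edRun max_denom A stack counts).items

-- ===== PRECONDITION & SPEC =====
def Spec_enumerate_denominators (max_denom : Int) (A : Int) (out : List (Int × Int)) : Prop := out = enumerate_denominators_alt max_denom A
instance (max_denom : Int) (A : Int) (out : List (Int × Int)) : Decidable (Spec_enumerate_denominators max_denom A out) := by unfold Spec_enumerate_denominators; infer_instance

-- ===== CLAIM (what is proved, stated in full; the proofs are below) =====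
def Claim_equal_enumerate_denominators : Prop := ∀ (max_denom : Int) (A : Int), Dom_enumerate_denominators max_denom A → Spec_enumerate_denominators max_denom A (enumerate_denominators max_denom A)

-- ===== LEMMAS AND PROOFS =====

def countFold (l : List Int) (d : PySem.Dict Int Int) : PySem.Dict Int Int :=
  l.foldl (fun d q => PySem.Dict.insert d q (PySem.Dict.getD d q 0 + 1)) d

theorem countFold_append (x y : List Int) (d : PySem.Dict Int Int) :
    countFold (x ++ y) d = countFold y (countFold x d) := by
  simp [countFold, List.foldl_append]

-- the DFS visit sequence of denominators below a state (proof-side specification shared by both ports)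
def visitsGo (md A : Int) : Nat → Int → Int → List Int → List Int
  | 0, _, _, out => out
  | f + 1, q_prev, q, out =>
    if md < q then out
    else
      let out1 := if 1 ≤ q then out ++ [q] else out
      let a_max := min A (PySem.Int.floordiv (md - q_prev) q)
      (PySem.List.pyRange 1 (a_max + 1) 1).foldl (fun o a => visitsGo md A f q (a * q + q_prev) o) out1

-- the accumulator of visitsGo only collects: visitsGo ... out = out ++ visitsGo ... []
theorem visitsGo_acc (md A : Int) :
    ∀ (f : Nat) (qp q : Int) (out : List Int),
      visitsGo md A f qp q out = out ++ visitsGo md A f qp q [] := by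
  intro f
  induction f with
  | zero => intro qp q out; simp [visitsGo]
  | succ f ih =>
    intro qp q out
    by_cases h : md < q
    · simp [visitsGo, h]
    · simp only [visitsGo, if_neg h]
      rw [PySem.List.foldl_congr_mem _ _ (fun o a => o ++ visitsGo md A f q (a * q + qp) []) _
            (fun acc x _ => ih q (x * q + qp) acc),
          PySem.List.foldl_congr_mem _ _ (fun o a => o ++ visitsGo md A f q (a * q + qp) []) _
            (fun acc x _ => ih q (x * q + qp) acc),
          PySem.List.foldl_append_eq_flatMap, PySem.List.foldl_append_eq_flatMap]
      by_cases hq : 1 ≤ q <;> simp [hq]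

-- one-step unfolding of visitsGo with a symbolic successor fuel (avoids repeated unfolding)
theorem visitsGo_succ (md A : Int) (f : Nat) (qp q : Int) :
    visitsGo md A (f + 1) qp q []
      = if md < q then []
        else (PySem.List.pyRange 1 (min A (PySem.Int.floordiv (md - qp) q) + 1) 1).foldl
              (fun o a => visitsGo md A f q (a * q + qp) o) (if 1 ≤ q then [q] else []) := by
  by_cases h : md < q <;> by_cases hq : 1 ≤ q <;> simp [visitsGo, h, hq]

-- A's enum equals: generate the visit sequence, then count it into the dict
theorem enum_eq_count (md A : Int) :
    ∀ (f : Nat) (qp q : Int), 0 ≤ qp → 1 ≤ q → ∀ d : PySem.Dict Int Int,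
      enumGo md A f qp q d = countFold (visitsGo md A f qp q []) d := by
  intro f
  induction f with
  | zero => intro qp q _ _ d; simp [enumGo, visitsGo, countFold]
  | succ f ih =>
    intro qp q hqp hq d
    by_cases h : md < q
    · simp [enumGo, visitsGo, h, countFold]
    · -- A's break-terminated child loop equals the range truncated at a_max
      have loopT : ∀ (l : List Int) (d : PySem.Dict Int Int),
          l.foldl (loopStep md (enumGo md A f) qp q) (d, true) = (d, true) := by
        intro l
        induction l with
        | nil => intro d; rfl
        | cons x t iht => intro d; simpa [loopStep] using iht d
      have loop : ∀ (n : Nat) (a : Int), (A + 1 - a).toNat ≤ n → 1 ≤ a →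
          ∀ d : PySem.Dict Int Int,
            ((PySem.List.pyRange a (A + 1) 1).foldl (loopStep md (enumGo md A f) qp q) (d, false)).1
              = countFold ((PySem.List.pyRange a (min A (PySem.Int.floordiv (md - qp) q) + 1)).flatMap
                  (fun b => visitsGo md A f q (b * q + qp) [])) d := by
        intro n
        induction n with
        | zero =>
          intro a hle _ d
          rw [PySem.List.pyRange_one_eq_nil (by omega), PySem.List.pyRange_one_eq_nil (by omega)]
          simp [countFold]
        | succ n ihn =>
          intro a hle ha d
          by_cases haA : a ≤ A
          · rw [PySem.List.pyRange_one_cons (by omega : a < A + 1), List.foldl_cons]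
            by_cases hnew : md < a * q + qp
            · have hdv : PySem.Int.floordiv (md - qp) q < a :=
                (PySem.Int.floordiv_lt_iff_lt_mul (by omega)).mpr (by linarith)
              rw [show loopStep md (enumGo md A f) qp q (d, false) a = (d, true) by
                    simp [loopStep, hnew],
                  loopT, PySem.List.pyRange_one_eq_nil (by omega)]
              simp [countFold]
            · have h1q : (1 : Int) ≤ a * q := by
                have := mul_le_mul ha hq zero_le_one (le_trans zero_le_one ha)
                linarith
              have hdv : a ≤ PySem.Int.floordiv (md - qp) q :=
                (PySem.Int.le_floordiv_iff_mul_le (by omega)).mpr (by linarith)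
              rw [show loopStep md (enumGo md A f) qp q (d, false) a
                    = (enumGo md A f q (a * q + qp) d, false) by simp [loopStep, hnew],
                  ihn (a + 1) (by omega) (by omega)]
              rw [PySem.List.pyRange_one_cons
                    (by omega : a < min A (PySem.Int.floordiv (md - qp) q) + 1),
                  List.flatMap_cons, countFold_append,
                  ih q (a * q + qp) (by omega) (by linarith) d]
          · rw [PySem.List.pyRange_one_eq_nil (by omega), PySem.List.pyRange_one_eq_nil (by omega)]
            simp [countFold]
      have hB : visitsGo md A (f + 1) qp q []
          = [q] ++ (PySem.List.pyRange 1 (min A (PySem.Int.floordiv (md - qp) q) + 1)).flatMap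
              (fun b => visitsGo md A f q (b * q + qp) []) := by
        rw [visitsGo_succ, if_neg h, if_pos hq]
        rw [PySem.List.foldl_congr_mem _ _ (fun o a => o ++ visitsGo md A f q (a * q + qp) []) _
              (fun acc x _ => visitsGo_acc md A f q (x * q + qp) acc),
            PySem.List.foldl_append_eq_flatMap]
      have hA : enumGo md A (f + 1) qp q d
          = ((PySem.List.pyRange 1 (A + 1) 1).foldl (loopStep md (enumGo md A f) qp q)
              (PySem.Dict.insert d q (PySem.Dict.getD d q 0 + 1), false)).1 := by
        simp [enumGo, h, hq]
      have h1 : countFold [q] d = PySem.Dict.insert d q (PySem.Dict.getD d q 0 + 1) := by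
        simp [countFold]
      rw [hB, countFold_append, h1, hA]
      exact loop A.toNat 1 (by omega) (by omega) _

-- the seed loop of A (all seeds a1 ≥ 1)
theorem seed_eq (md A : Int) (fuel : Nat) :
    ∀ (as : List Int), (∀ x ∈ as, 1 ≤ x) → ∀ d : PySem.Dict Int Int,
      as.foldl (fun d a1 => enumGo md A fuel 1 a1 d) d
        = countFold (as.flatMap (fun a1 => visitsGo md A fuel 1 a1 [])) d := by
  intro as
  induction as with
  | nil => intro _ d; simp [countFold]
  | cons x t iht =>
    intro hmem d
    simp only [List.foldl_cons, List.flatMap_cons]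
    rw [countFold_append, enum_eq_count md A fuel 1 x (by omega) (hmem x (by simp))]
    exact iht (fun y hy => hmem y (by simp [hy])) _

theorem flatMap_congr_mem {α β : Type} (l : List α) (f g : α → List β)
    (h : ∀ x ∈ l, f x = g x) : l.flatMap f = l.flatMap g := by
  induction l with
  | nil => rfl
  | cons x t ih =>
    simp only [List.flatMap_cons]
    rw [h x (by simp), ih (fun y hy => h y (by simp [hy]))]

-- the visit sequence does not depend on the fuel once the fuel covers the remaining depth
theorem visits_fuel (md A : Int) :
    ∀ (k : Nat) (qp q : Int) (f1 f2 : Nat), 1 ≤ qp → qp ≤ q →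
      (md - q).toNat < k → (md - q).toNat + 1 ≤ f1 → (md - q).toNat + 1 ≤ f2 →
      visitsGo md A f1 qp q [] = visitsGo md A f2 qp q [] := by
  intro k
  induction k with
  | zero => intro qp q f1 f2 _ _ hk _ _; omega
  | succ k ih =>
    intro qp q f1 f2 h1 h2 hk hf1 hf2
    obtain ⟨g1, rfl⟩ : ∃ g, f1 = g + 1 := ⟨f1 - 1, by omega⟩
    obtain ⟨g2, rfl⟩ : ∃ g, f2 = g + 1 := ⟨f2 - 1, by omega⟩
    by_cases h : md < q
    · simp [visitsGo, h]
    · simp only [visitsGo, if_neg h]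
      apply PySem.List.foldl_congr_mem
      intro acc b hb
      obtain ⟨hb1, hb2⟩ := PySem.List.mem_pyRange_one.mp hb
      have hble : b ≤ PySem.Int.floordiv (md - qp) q := by omega
      have hbq : b * q + qp ≤ md := by
        have := (PySem.Int.le_floordiv_iff_mul_le (by omega)).mp hble
        linarith
      have hq2 : q ≤ b * q := le_mul_of_one_le_left (by omega) hb1
      have hvge : q + 1 ≤ b * q + qp := by omega
      rw [visitsGo_acc md A g1 q (b * q + qp) acc, visitsGo_acc md A g2 q (b * q + qp) acc,
          ih q (b * q + qp) g1 g2 (by omega) (by omega) (by omega) (by omega) (by omega)]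

-- B's worklist run counts the concatenated visit sequences of the stack's states
theorem edRun_spec (md A : Int) :
    ∀ (n : Nat) (st : List (Int × Int)) (d : PySem.Dict Int Int),
      edMeasure md A st ≤ n → (∀ p ∈ st, 1 ≤ p.1 ∧ p.1 ≤ p.2 ∧ p.2 ≤ md) →
      edRun md A st d
        = countFold (st.flatMap (fun p => visitsGo md A ((md - p.2).toNat + 2) p.1 p.2 [])) d := by
  intro n
  induction n with
  | zero =>
    intro st d hm hg
    cases st with
    | nil => simp [edRun, countFold]
    | cons p rest =>
      exfalso
      have : 1 ≤ edPhi md A p.2 := Nat.one_le_pow _ _ (by omega)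
      have : edMeasure md A (p :: rest) = edPhi md A p.2 + edMeasure md A rest := by
        simp [edMeasure]
      omega
  | succ n ih =>
    intro st d hm hg
    cases st with
    | nil => simp [edRun, countFold]
    | cons p rest =>
      obtain ⟨qp, q⟩ := p
      obtain ⟨h1, h2, h3⟩ := hg (qp, q) (by simp)
      rw [edRun, dif_pos ⟨h1, h2, h3⟩]
      have hmlt := edKids_measure_lt md A qp q h1 h2 h3 rest
      have hkids := edKids_spec md A qp q h1 h2
      have hgood : ∀ p ∈ edKids md A qp q ++ rest, 1 ≤ p.1 ∧ p.1 ≤ p.2 ∧ p.2 ≤ md := by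
        intro p hp
        rcases List.mem_append.mp hp with hp | hp
        · rw [hkids] at hp
          obtain ⟨b, hb, rfl⟩ := List.mem_map.mp hp
          obtain ⟨hb1, hb2⟩ := PySem.List.mem_pyRange_one.mp hb
          have hble : b ≤ PySem.Int.floordiv (md - qp) q := by omega
          have hbq : b * q + qp ≤ md := by
            have := (PySem.Int.le_floordiv_iff_mul_le (by omega)).mp hble
            linarith
          have hq2 : q ≤ b * q := le_mul_of_one_le_left (by omega) hb1
          exact ⟨by omega, by simp; omega, by simpa using hbq⟩
        · exact hg p (by simp [hp])
      have hcons : edMeasure md A ((qp, q) :: rest) ≤ n + 1 := hm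
      have hsplit : edMeasure md A ((qp, q) :: rest) = edPhi md A q + edMeasure md A rest := by
        simp [edMeasure]
      rw [ih (edKids md A qp q ++ rest) _ (by omega) hgood]
      -- head's visit sequence, unfolded one level
      have hV : visitsGo md A ((md - q).toNat + 2) qp q []
          = [q] ++ (PySem.List.pyRange 1 (min A (PySem.Int.floordiv (md - qp) q) + 1) 1).flatMap
              (fun b => visitsGo md A ((md - (b * q + qp)).toNat + 2) q (b * q + qp) []) := by
        have hnot : ¬ md < q := by omega
        have hq1 : (1 : Int) ≤ q := by omega
        rw [show (md - q).toNat + 2 = ((md - q).toNat + 1) + 1 from rfl,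
            visitsGo_succ, if_neg hnot, if_pos hq1]
        rw [PySem.List.foldl_congr_mem _ _
              (fun o b => o ++ visitsGo md A ((md - (b * q + qp)).toNat + 2) q (b * q + qp) []) _
              (by
                intro acc b hb
                obtain ⟨hb1, hb2⟩ := PySem.List.mem_pyRange_one.mp hb
                have hble : b ≤ PySem.Int.floordiv (md - qp) q := by omega
                have hbq : b * q + qp ≤ md := by
                  have := (PySem.Int.le_floordiv_iff_mul_le (by omega)).mp hble
                  linarith
                have hq2 : q ≤ b * q := le_mul_of_one_le_left (by omega) hb1
                have hvge : q + 1 ≤ b * q + qp := by omega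
                rw [visitsGo_acc md A ((md - q).toNat + 1) q (b * q + qp) acc,
                    visits_fuel md A ((md - (b * q + qp)).toNat + 1) q (b * q + qp)
                      ((md - q).toNat + 1) ((md - (b * q + qp)).toNat + 2)
                      (by omega) (by omega) (by omega) (by omega) (by omega)]),
            PySem.List.foldl_append_eq_flatMap]
      rw [List.flatMap_cons, hV, countFold_append, countFold_append]
      have h1d : countFold [q] d = PySem.Dict.insert d q (PySem.Dict.getD d q 0 + 1) := by
        simp [countFold]
      rw [h1d, List.flatMap_append, countFold_append, hkids, List.flatMap_map]

-- the two seed enumerations produce the same visit sequence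
theorem seeds_bridge (md A : Int) :
    (PySem.List.pyRange 1 (A + 1) 1).flatMap
        (fun a1 => visitsGo md A ((max md 0).toNat + 2) 1 a1 [])
      = (PySem.List.pyRange 1 (min A md + 1) 1).flatMap
          (fun a1 => visitsGo md A ((md - a1).toNat + 2) 1 a1 []) := by
  have hfix : ∀ a1 : Int, 1 ≤ a1 → a1 ≤ md →
      visitsGo md A ((max md 0).toNat + 2) 1 a1 []
        = visitsGo md A ((md - a1).toNat + 2) 1 a1 [] :=
    fun a1 h1 h2 =>
      visits_fuel md A ((md - a1).toNat + 1) 1 a1 _ _ (by omega) h1 (by omega) (by omega) (by omega)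
  have hdead : ∀ a1 : Int, md < a1 →
      visitsGo md A ((max md 0).toNat + 2) 1 a1 [] = [] := by
    intro a1 h
    rw [show (max md 0).toNat + 2 = ((max md 0).toNat + 1) + 1 from rfl, visitsGo_succ, if_pos h]
  by_cases hAm : A ≤ md
  · have : min A md = A := by omega
    rw [this]
    exact flatMap_congr_mem _ _ _ (fun x hx => by
      obtain ⟨hx1, hx2⟩ := PySem.List.mem_pyRange_one.mp hx
      exact hfix x hx1 (by omega))
  · have hmin : min A md = md := by omega
    rw [hmin]
    by_cases hmd : 0 ≤ md
    · rw [PySem.List.pyRange_one_append 1 (md + 1) (A + 1) (by omega) (by omega),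
          List.flatMap_append]
      have hpart2 : (PySem.List.pyRange (md + 1) (A + 1) 1).flatMap
          (fun a1 => visitsGo md A ((max md 0).toNat + 2) 1 a1 []) = [] := by
        rw [flatMap_congr_mem _ _ (fun _ => ([] : List Int)) (fun x hx => by
          obtain ⟨hx1, hx2⟩ := PySem.List.mem_pyRange_one.mp hx
          exact hdead x (by omega))]
        simp
      rw [hpart2, List.append_nil]
      exact flatMap_congr_mem _ _ _ (fun x hx => by
        obtain ⟨hx1, hx2⟩ := PySem.List.mem_pyRange_one.mp hx
        exact hfix x hx1 (by omega))
    · rw [PySem.List.pyRange_one_eq_nil (by omega : (md + 1 : Int) ≤ 1)]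
      rw [flatMap_congr_mem _ _ (fun _ => ([] : List Int)) (fun x hx => by
        obtain ⟨hx1, hx2⟩ := PySem.List.mem_pyRange_one.mp hx
        exact hdead x (by omega))]
      simp

-- ===== VERDICT (by name: the statement is the Claim_ definition above) =====
theorem enumerate_denominators_spec : Claim_equal_enumerate_denominators := by
  unfold Claim_equal_enumerate_denominators Spec_enumerate_denominators
  intro md A _
  simp only [enumerate_denominators, enumerate_denominators_alt]
  rw [seed_eq md A ((max md 0).toNat + 2) (PySem.List.pyRange 1 (A + 1))
        (fun x hx => (PySem.List.mem_pyRange_one.mp hx).1),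
      seeds_bridge md A]
  rw [edRun_spec md A
        (edMeasure md A ((PySem.List.pyRange 1 (min A md + 1) 1).map (fun a1 => ((1 : Int), a1))))
        _ _ (le_refl _)
        (by
          intro p hp
          obtain ⟨b, hb, rfl⟩ := List.mem_map.mp hp
          obtain ⟨hb1, hb2⟩ := PySem.List.mem_pyRange_one.mp hb
          exact ⟨by omega, by simp; omega, by simp; omega⟩)]
  rw [List.flatMap_map]
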